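-- pv_equiv track=rewrite | github.com/oscartejera/josephine-app | prophet-service/pos_etl.py | detect_column
-- ===== SOURCE A (Python) =====
-- from typing import Optional
--
-- def detect_column(headers: list[str], candidates: list[str]) -> Optional[str]:
--     """Find the best matching column name from a list of candidates."""
--     headers_lower = [h.lower().strip() for h in headers]
--     for candidate in candidates:
--         for i, h in enumerate(headers_lower):
--             if h == candidate:
--                 return headers[i]
--     # Partial match
--     for candidate in candidates:
--         for i, h in enumerate(headers_lower):
--             if candidate in h:
--                 return headers[i]
--     return None
-- ===== SOURCE B (Python) =====
-- def detect_column(headers, candidates):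
--     """Find the best matching column name from a list of candidates."""
--     norm = [h.lower().strip() for h in headers]
--     partial = None
--     for candidate in candidates:
--         for orig, h in zip(headers, norm):
--             if h == candidate:
--                 return orig
--             if partial is None and candidate in h:
--                 partial = orig
--     return partial
-- ===== Notes on version B (the rewrite author's own statement) =====
-- stated objective: simpler
-- what changed: B collapses A's two staged passes (all candidates exact, then all candidates substring) into a single pass over the candidates: each header scan checks exact and substring at once, returning immediately on an exact hit while an accumulator remembers the first substring hit to return at the end.
import Mathlib
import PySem

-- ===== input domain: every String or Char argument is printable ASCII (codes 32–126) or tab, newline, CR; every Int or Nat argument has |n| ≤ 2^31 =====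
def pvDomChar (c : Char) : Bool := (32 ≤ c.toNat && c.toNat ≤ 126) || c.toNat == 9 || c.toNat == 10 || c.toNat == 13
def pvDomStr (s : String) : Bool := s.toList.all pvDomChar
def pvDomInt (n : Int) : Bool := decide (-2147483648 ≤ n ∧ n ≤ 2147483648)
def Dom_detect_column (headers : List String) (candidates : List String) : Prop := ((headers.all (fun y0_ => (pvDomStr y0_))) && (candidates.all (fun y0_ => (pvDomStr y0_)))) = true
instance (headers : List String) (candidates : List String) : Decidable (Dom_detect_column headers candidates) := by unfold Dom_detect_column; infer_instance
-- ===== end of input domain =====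

-- B fuses A's two staged passes (exact pass over all candidates, then substring pass)
-- into one pass over the candidates with an accumulator for the first substring hit
-- (objective: simpler).

-- ===== PORT A =====
-- inner loop of A's exact phase over (original, lowered) header pairs
def pvAExact (pairs : List (String × String)) (c : String) : Option String :=
  match pairs with
  | [] => none
  | (orig, h) :: rest => if h = c then some orig else pvAExact rest c

-- inner loop of A's partial phase ('candidate in h')
def pvAPartial (pairs : List (String × String)) (c : String) : Option String :=
  match pairs with
  | [] => none
  | (orig, h) :: rest => if PySem.Str.isIn c h then some orig else pvAPartial rest c

def pvALoopExact (cands : List String) (pairs : List (String × String)) : Option String :=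
  match cands with
  | [] => none
  | c :: cs =>
    match pvAExact pairs c with
    | some r => some r
    | none => pvALoopExact cs pairs

def pvALoopPartial (cands : List String) (pairs : List (String × String)) : Option String :=
  match cands with
  | [] => none
  | c :: cs =>
    match pvAPartial pairs c with
    | some r => some r
    | none => pvALoopPartial cs pairs

def detect_column (headers : List String) (candidates : List String) : Option String :=
  let headersLower := headers.map (fun h => PySem.Str.strip (PySem.Str.lower h))
  let pairs := headers.zip headersLower
  match pvALoopExact candidates pairs with
  | some r => some r
  | none => pvALoopPartial candidates pairs

-- ===== PORT B =====
-- one scan of the headers for candidate c: return Sum.inl orig on an exact hit,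
-- otherwise Sum.inr of the (possibly updated) first-partial accumulator
def pvBInner (pairs : List (String × String)) (c : String) (p : Option String) :
    String ⊕ Option String :=
  match pairs with
  | [] => Sum.inr p
  | (orig, h) :: rest =>
    if h = c then Sum.inl orig
    else pvBInner rest c (if p.isNone && PySem.Str.isIn c h then some orig else p)

def pvBOuter (cands : List String) (pairs : List (String × String)) (p : Option String) :
    Option String :=
  match cands with
  | [] => p
  | c :: cs =>
    match pvBInner pairs c p with
    | Sum.inl r => some r
    | Sum.inr p' => pvBOuter cs pairs p'

def detect_column_alt (headers : List String) (candidates : List String) : Option String :=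
  let norm := headers.map (fun h => PySem.Str.strip (PySem.Str.lower h))
  pvBOuter candidates (headers.zip norm) none

-- ===== PRECONDITION & SPEC =====
def Spec_detect_column (headers : List String) (candidates : List String) (out : Option String) : Prop := out = detect_column_alt headers candidates
instance (headers : List String) (candidates : List String) (out : Option String) : Decidable (Spec_detect_column headers candidates out) := by unfold Spec_detect_column; infer_instance

-- ===== CLAIM (what is proved, stated in full; the proofs are below) =====
def Claim_equal_detect_column : Prop := ∀ (headers : List String) (candidates : List String), Dom_detect_column headers candidates → Spec_detect_column headers candidates (detect_column headers candidates)

-- ===== LEMMAS AND PROOFS =====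

-- B's fused header scan equals A's exact scan, falling back to the accumulator
-- or-ed with A's partial scan
theorem pvBInner_eq (pairs : List (String × String)) (c : String) (p : Option String) :
    pvBInner pairs c p =
      match pvAExact pairs c with
      | some r => Sum.inl r
      | none => Sum.inr (p.or (pvAPartial pairs c)) := by
  induction pairs generalizing p with
  | nil => cases p <;> simp [pvBInner, pvAExact, pvAPartial]
  | cons hd rest ih =>
    obtain ⟨orig, h⟩ := hd
    by_cases hc : h = c
    · simp [pvBInner, pvAExact, hc]
    · simp only [pvBInner, pvAExact, pvAPartial, if_neg hc, ih]
      cases hA : pvAExact rest c with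
      | some r => simp
      | none =>
        cases p with
        | some v => simp
        | none =>
          cases hin : PySem.Chars.isIn c.toList h.toList <;>
            simp [PySem.Str.isIn, hin]

-- B's candidate loop equals A's exact loop, falling back to the accumulator
-- or-ed with A's partial loop
theorem pvBOuter_eq (cands : List String) (pairs : List (String × String)) (p : Option String) :
    pvBOuter cands pairs p =
      match pvALoopExact cands pairs with
      | some r => some r
      | none => p.or (pvALoopPartial cands pairs) := by
  induction cands generalizing p with
  | nil => cases p <;> simp [pvBOuter, pvALoopExact, pvALoopPartial]
  | cons c cs ih =>
    simp only [pvBOuter, pvALoopExact, pvALoopPartial, pvBInner_eq]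
    cases hE : pvAExact pairs c with
    | some r => simp
    | none =>
      simp only [ih]
      cases hL : pvALoopExact cs pairs with
      | some r => simp
      | none =>
        cases hP : pvAPartial pairs c with
        | some r => simp
        | none => simp

-- ===== VERDICT (by name: the statement is the Claim_ definition above) =====
theorem detect_column_spec : Claim_equal_detect_column := by
  intro headers candidates _
  unfold Spec_detect_column detect_column detect_column_alt
  simp only [pvBOuter_eq]
  cases hE : pvALoopExact candidates (headers.zip (headers.map (fun h => PySem.Str.strip (PySem.Str.lower h)))) <;> simp
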